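-- pv_equiv track=rewrite | github.com/mctools/simplebuild | src/_simple_build_system/_export_jsoncmds.py | _eval_makefile_vars
-- ===== SOURCE A (Python) =====
-- def _eval_makefile_vars( s, varmap ):
--     if '${' not in s:
--         return s
--     any_hits = False
--     for k,v in varmap:
--         _k = '${%s}'%k
--         if _k in s:
--             any_hits = True
--             s = s.replace(_k,v)
--     return _eval_makefile_vars(s, varmap) if any_hits else s
-- ===== SOURCE B (Python) =====
-- def _eval_makefile_vars(s, varmap):
--     def substitute_all(t, pairs):
--         if not pairs:
--             return t
--         k, v = pairs[0]
--         return substitute_all(t.replace('${' + k + '}', v), pairs[1:])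
--     while '${' in s:
--         t = substitute_all(s, varmap)
--         if t == s:
--             break
--         s = t
--     return s
-- ===== Notes on version B (the rewrite author's own statement) =====
-- stated objective: alternative
-- what changed: Replaces A's any_hits-flag tail recursion with an iterative fixpoint while-loop whose progress test is a string comparison, and replaces the for-loop pass by a recursive helper over the varmap list that replaces every placeholder unconditionally.
import Mathlib
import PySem

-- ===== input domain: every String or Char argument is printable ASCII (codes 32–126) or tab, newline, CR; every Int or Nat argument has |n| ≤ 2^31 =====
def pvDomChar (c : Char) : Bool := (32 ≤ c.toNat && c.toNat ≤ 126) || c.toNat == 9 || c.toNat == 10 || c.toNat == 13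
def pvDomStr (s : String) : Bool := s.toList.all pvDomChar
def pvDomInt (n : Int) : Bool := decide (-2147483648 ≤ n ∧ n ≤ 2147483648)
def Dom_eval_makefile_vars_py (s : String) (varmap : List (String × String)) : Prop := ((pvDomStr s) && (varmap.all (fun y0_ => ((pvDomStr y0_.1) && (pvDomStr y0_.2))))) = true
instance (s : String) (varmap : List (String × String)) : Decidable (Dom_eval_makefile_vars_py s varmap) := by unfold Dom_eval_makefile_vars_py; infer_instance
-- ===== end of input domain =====

-- B replaces A's any_hits-flag tail recursion by an iterative fixpoint loop (a recursive
-- helper replaces every placeholder unconditionally; stop when a pass changes nothing):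
-- a different decomposition, same cost.


-- ===== PORT A =====
-- one iteration of A's `for k,v in varmap` loop: membership test, any_hits flag, replace
def pvStepA (p : String × Bool) (kv : String × String) : String × Bool :=
  let _k : String := "${" ++ kv.1 ++ "}"
  if PySem.Str.isIn _k p.1 = true then (PySem.Str.replace p.1 _k kv.2, true) else p

-- A's recursion, fuel-guarded for totality; pvFuelA below exceeds the recursion depth
-- whenever the Python recursion terminates (an exhausted fuel would mean Python A diverges)
def pvGoA : Nat → String → List (String × String) → String
  | 0, s, _ => s
  | fuel+1, s, varmap =>
    if PySem.Str.isIn "${" s = false then s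
    else
      let r := varmap.foldl pvStepA (s, false)
      if r.2 then pvGoA fuel r.1 varmap else r.1

-- generous fuel: far above the recursion depth on any input on which Python A returns
def pvFuelA (s : String) (varmap : List (String × String)) : Nat :=
  let L := s.length + varmap.foldl (fun a kv => a + kv.1.length + kv.2.length + 5) 0 + 2
  L * L

def eval_makefile_vars_py (s : String) (varmap : List (String × String)) : String :=
  pvGoA (pvFuelA s varmap) s varmap

-- ===== PORT B =====
-- Source B's `substitute_all`: structural recursion over the pairs, unconditional replace
def pvSubstituteAll : String → List (String × String) → String
  | t, [] => t
  | t, kv :: rest => pvSubstituteAll (PySem.Str.replace t ("${" ++ kv.1 ++ "}") kv.2) rest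

-- one trip round Source B's while-loop, on a (current string, loop-finished) state
def pvTrip (varmap : List (String × String)) (st : String × Bool) : String × Bool :=
  if st.2 then st
  else if PySem.Str.isIn "${" st.1 = false then (st.1, true)
  else
    let t := pvSubstituteAll st.1 varmap
    if t == st.1 then (st.1, true) else (t, false)

-- the while-loop as a bounded iteration of pvTrip (totality guard; cf. pvFuelA's comment)
def pvFuelB (s : String) (varmap : List (String × String)) : Nat :=
  let n := s.length + ((varmap.map (fun kv => kv.1.length + kv.2.length + 5)).sum) + 2
  n ^ 2

def eval_makefile_vars_py_alt (s : String) (varmap : List (String × String)) : String :=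
  ((List.range (pvFuelB s varmap)).foldl (fun st _ => pvTrip varmap st) (s, false)).1

-- ===== PRECONDITION & SPEC =====
-- no Pre_: the two PORTS agree on every input (on varmaps that substitute a placeholder
-- for itself the PYTHONS do not return — A exceeds the recursion limit, B loops)
def Spec_eval_makefile_vars_py (s : String) (varmap : List (String × String)) (out : String) : Prop := out = eval_makefile_vars_py_alt s varmap
instance (s : String) (varmap : List (String × String)) (out : String) : Decidable (Spec_eval_makefile_vars_py s varmap out) := by unfold Spec_eval_makefile_vars_py; infer_instance

-- ===== CLAIM (what is proved, stated in full; the proofs are below) =====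
def Claim_equal_eval_makefile_vars_py : Prop := ∀ (s : String) (varmap : List (String × String)), Dom_eval_makefile_vars_py s varmap → Spec_eval_makefile_vars_py s varmap (eval_makefile_vars_py s varmap)

-- ===== LEMMAS AND PROOFS =====

-- replace.go on a string without an occurrence of `old` just reconstructs its input
theorem pv_go_skip (old new : List Char) (fuel : Nat) :
    ∀ (l acc : List Char), old ≠ [] → ¬ old <:+: l →
      PySem.Chars.replace.go old new fuel l acc = acc.reverse ++ l := by
  induction fuel with
  | zero => intro l acc _ _; rw [PySem.Chars.replace.go]
  | succ f ih =>
    intro l acc hne hinf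
    cases l with
    | nil => rw [PySem.Chars.replace.go] <;> simp
    | cons c t =>
      rw [PySem.Chars.replace.go]
      have hpre : old.isPrefixOf (c :: t) = false := by
        by_contra h
        exact hinf ((List.isPrefixOf_iff_prefix.mp (by simpa using h)).isInfix)
      simp only [hpre, Bool.false_eq_true, if_false]
      have : ¬ old <:+: t := fun h => hinf (h.trans (List.suffix_cons c t).isInfix)
      rw [ih t (c :: acc) hne this]
      simp

-- the pattern '${k}' is never empty
theorem pv_pat_ne (k : String) : ("${" ++ k ++ "}").toList ≠ [] := by
  simp [String.toList_append]

-- replace with an absent pattern is the identity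
theorem pv_replace_of_not_isIn (s : String) (k v : String)
    (h : PySem.Str.isIn ("${" ++ k ++ "}") s = false) :
    PySem.Str.replace s ("${" ++ k ++ "}") v = s := by
  apply String.toList_inj.mp
  rw [PySem.Str.toList_replace, PySem.Chars.replace]
  have hne := pv_pat_ne k
  have hinf : ¬ ("${" ++ k ++ "}").toList <:+: s.toList := by
    rw [← PySem.Chars.isIn_eq_false_iff]
    simpa [PySem.Str.isIn_eq] using h
  rw [if_neg (by simpa [List.isEmpty_iff] using hne)]
  simpa using pv_go_skip _ _ s.toList.length s.toList [] hne hinf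

-- A's pass and B's pass compute the same string
theorem pv_fold_fst (varmap : List (String × String)) :
    ∀ (s : String) (b : Bool),
      (varmap.foldl pvStepA (s, b)).1 = pvSubstituteAll s varmap := by
  induction varmap with
  | nil => intro s b; rfl
  | cons kv r ih =>
    intro s b
    simp only [List.foldl_cons, pvSubstituteAll]
    by_cases h : PySem.Str.isIn ("${" ++ kv.1 ++ "}") s = true
    · simp only [pvStepA, h, if_true]; exact ih _ _
    · simp only [pvStepA, if_neg h]
      rw [pv_replace_of_not_isIn s kv.1 kv.2 (by simpa using h)]
      exact ih _ _

-- once set, any_hits stays set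
theorem pv_fold_snd_true (varmap : List (String × String)) :
    ∀ (s : String), (varmap.foldl pvStepA (s, true)).2 = true := by
  induction varmap with
  | nil => intro s; rfl
  | cons kv r ih =>
    intro s
    simp only [List.foldl_cons, pvStepA]
    by_cases h : PySem.Str.isIn ("${" ++ kv.1 ++ "}") s = true
    · simp only [h, if_true]; exact ih _
    · simp only [if_neg h]; exact ih _

-- a pass with any_hits still false left the string untouched
theorem pv_fold_snd_false (varmap : List (String × String)) :
    ∀ (s : String), (varmap.foldl pvStepA (s, false)).2 = false →
      (varmap.foldl pvStepA (s, false)).1 = s := by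
  induction varmap with
  | nil => intro s _; rfl
  | cons kv r ih =>
    intro s h
    simp only [List.foldl_cons, pvStepA] at h ⊢
    by_cases hin : PySem.Str.isIn ("${" ++ kv.1 ++ "}") s = true
    · rw [if_pos hin] at h
      exact absurd (pv_fold_snd_true r _) (by rw [h]; simp)
    · rw [if_neg hin] at h ⊢
      exact ih s h

-- a pass that hits yet returns the same string makes A's recursion loop on that string,
-- so the fuel runs out and the string itself comes back
theorem pv_stuck (varmap : List (String × String)) (s : String)
    (hhit : (varmap.foldl pvStepA (s, false)).2 = true)
    (hfix : (varmap.foldl pvStepA (s, false)).1 = s) :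
    ∀ (fuel : Nat), pvGoA fuel s varmap = s := by
  intro fuel
  induction fuel with
  | zero => rfl
  | succ f ih =>
    rw [pvGoA]
    by_cases h0 : PySem.Str.isIn "${" s = false
    · rw [if_pos h0]
    · rw [if_neg h0, if_pos hhit, hfix, ih]

-- pvTrip ignores the iterated list element, so the range-foldl is a plain Nat iteration
theorem pv_foldl_range_trip (varmap : List (String × String)) (l : List Nat) :
    ∀ (st : String × Bool),
      l.foldl (fun st _ => pvTrip varmap st) st = (fun st => pvTrip varmap st)^[l.length] st := by
  induction l with
  | nil => intro st; rfl
  | cons a r ih =>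
    intro st
    simp only [List.foldl_cons, List.length_cons, Function.iterate_succ_apply]
    exact ih _

-- the finished state is absorbing
theorem pv_trip_done (varmap : List (String × String)) (s : String) :
    ∀ (n : Nat), (fun st => pvTrip varmap st)^[n] (s, true) = (s, true) := by
  intro n
  induction n with
  | zero => rfl
  | succ m ih => rw [Function.iterate_succ_apply, pvTrip]; exact ih

-- A's fuel recursion equals n iterations of B's loop body, for every n
theorem pv_goA_eq_iter (varmap : List (String × String)) :
    ∀ (n : Nat) (s : String),
      pvGoA n s varmap = ((fun st => pvTrip varmap st)^[n] (s, false)).1 := by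
  intro n
  induction n with
  | zero => intro s; rfl
  | succ m ih =>
    intro s
    rw [pvGoA, Function.iterate_succ_apply]
    by_cases h0 : PySem.Str.isIn "${" s = false
    · have h0c : PySem.Chars.isIn ['$', '{'] s.toList = false := by
        simpa [PySem.Str.isIn_eq] using h0
      have hstep : pvTrip varmap (s, false) = (s, true) := by simp [pvTrip, h0c]
      rw [if_pos h0, hstep, pv_trip_done]
    · have h0c : PySem.Chars.isIn ['$', '{'] s.toList = true := by
        revert h0; simp [PySem.Str.isIn_eq]
      rw [if_neg h0]
      have hfst := pv_fold_fst varmap s false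
      by_cases hb : (varmap.foldl pvStepA (s, false)).2 = true
      · by_cases hfix : pvSubstituteAll s varmap = s
        · have hstep : pvTrip varmap (s, false) = (s, true) := by
            simp [pvTrip, h0c, hfix]
          rw [if_pos hb, hfst, hfix, hstep, pv_trip_done]
          exact pv_stuck varmap s hb (hfst.trans hfix) m
        · have hstep : pvTrip varmap (s, false) = (pvSubstituteAll s varmap, false) := by
            simp [pvTrip, h0c, hfix]
          rw [if_pos hb, hfst, hstep]
          exact ih _
      · have hb' : (varmap.foldl pvStepA (s, false)).2 = false := by simpa using hb
        have hfix : pvSubstituteAll s varmap = s :=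
          hfst.symm.trans (pv_fold_snd_false varmap s hb')
        have hstep : pvTrip varmap (s, false) = (s, true) := by
          simp [pvTrip, h0c, hfix]
        rw [if_neg hb, hfst, hfix, hstep, pv_trip_done]

-- the two fuel expressions denote the same number
theorem pv_fold_len (varmap : List (String × String)) :
    ∀ (a : Nat), varmap.foldl (fun a kv => a + kv.1.length + kv.2.length + 5) a
      = a + (varmap.map (fun kv => kv.1.length + kv.2.length + 5)).sum := by
  induction varmap with
  | nil => intro a; simp
  | cons kv r ih => intro a; simp only [List.foldl_cons, List.map_cons, List.sum_cons, ih]; omega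

theorem pv_fuel_eq (s : String) (varmap : List (String × String)) :
    pvFuelA s varmap = pvFuelB s varmap := by
  unfold pvFuelA pvFuelB
  rw [pv_fold_len]
  ring

-- ===== VERDICT (by name: the statement is the Claim_ definition above) =====
theorem eval_makefile_vars_py_spec : Claim_equal_eval_makefile_vars_py := by
  intro s varmap _
  unfold Spec_eval_makefile_vars_py eval_makefile_vars_py eval_makefile_vars_py_alt
  rw [pv_foldl_range_trip, List.length_range, ← pv_fuel_eq]
  exact pv_goA_eq_iter varmap _ s
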